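-- pv_equiv track=rewrite | github.com/sstonaker/grokking-the-coding-interview | islands-matrix-traversal/biggest_island.py | max_island_area_dfs
-- ===== SOURCE A (Python) =====
-- def max_island_area_dfs(matrix):
--     rows = len(matrix)
--     cols = len(matrix[0])
--     biggest_island = 0
--
--     for i in range(rows):
--         for j in range(cols):
--             if matrix[i][j] == 1:  # only if the cell is land
--                 biggest_island = max(
--                     biggest_island, visit_islands_dfs(matrix, i, j))
--     return biggest_island
--
-- def visit_islands_dfs(matrix, x, y):
--     if x < 0 or x >= len(matrix) or y < 0 or y >= len(matrix[0]):
--         return 0  # return if not a valid cell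
--     if matrix[x][y] == 0:
--         return 0  # return if a water cell
--     matrix[x][y] = 0  # mark visited by making a water cell
--
--     area = 1  # count the current cell
--     # recursively visit all neighboring cells (horizontally & vertically)
--     area += visit_islands_dfs(matrix, x + 1, y)  # lower cell
--     area += visit_islands_dfs(matrix, x - 1, y)  # upper cell
--     area += visit_islands_dfs(matrix, x, y + 1)  # right cell
--     area += visit_islands_dfs(matrix, x, y - 1)  # left cell
--     return area
-- ===== SOURCE B (Python) =====
-- def max_island_area_dfs(matrix):
--     rows = len(matrix)
--     cols = len(matrix[0])
--     best = 0
--     cells = [(i, j) for i in range(rows) for j in range(cols)]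
--     for i, j in cells:
--         if matrix[i][j] != 1:
--             continue
--         area = 0
--         stack = [(i, j)]
--         while stack:
--             x, y = stack.pop()
--             if x < 0 or x >= rows or y < 0 or y >= cols:
--                 continue
--             if matrix[x][y] == 0:
--                 continue
--             matrix[x][y] = 0  # same in-place zeroing as A
--             area += 1
--             stack.extend(((x, y - 1), (x, y + 1), (x - 1, y), (x + 1, y)))
--         if area > best:
--             best = area
--     return best
-- ===== Notes on version B (the rewrite author's own statement) =====
-- stated objective: alternative
-- what changed: The recursive helper visit_islands_dfs is removed entirely: B precomputes a flat list of all cell coordinates, scans it once, and floods each island with an explicit-stack iterative fill (pop a cell, continue-style bound/water guards against precomputed rows/cols, zero it and push its four neighbors); the in-place zeroing side effect on the matrix is identical.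
import Mathlib
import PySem

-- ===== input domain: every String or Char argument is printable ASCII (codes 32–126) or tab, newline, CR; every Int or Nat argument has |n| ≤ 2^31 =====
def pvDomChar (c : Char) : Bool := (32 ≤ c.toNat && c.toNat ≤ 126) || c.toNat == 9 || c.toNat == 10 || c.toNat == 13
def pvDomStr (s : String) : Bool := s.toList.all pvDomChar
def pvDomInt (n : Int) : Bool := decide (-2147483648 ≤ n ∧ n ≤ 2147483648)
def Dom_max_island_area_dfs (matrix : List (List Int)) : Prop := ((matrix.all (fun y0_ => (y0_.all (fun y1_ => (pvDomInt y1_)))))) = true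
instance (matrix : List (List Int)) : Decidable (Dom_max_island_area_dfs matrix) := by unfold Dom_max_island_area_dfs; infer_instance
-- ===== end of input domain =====

-- B replaces A's recursive flood-fill helper by a single flat scan over a precomputed cell list with
-- an explicit-stack iterative flood fill and continue-style guards (alternative decomposition, same
-- cost); both mutate the Python matrix in place identically, and the equivalence proved here is
-- about the return value.


-- ===== PORT A =====
-- matrix[x][y] read; both programs only read it under the guard 0 ≤ x < len(matrix), 0 ≤ y (exact there)
def cellGet (m : List (List Int)) (x y : Int) : Int :=
  PySem.List.pyGetD (PySem.List.pyGetD m x []) y 0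

-- matrix[x][y] = 0, performed only under the same guard (exact there)
def cellSet (m : List (List Int)) (x y : Int) : List (List Int) :=
  m.set x.toNat ((PySem.List.pyGetD m x []).set y.toNat 0)

-- number of non-water cells; every recursive level of visit_islands_dfs that does work first zeroes
-- one such cell, so fuel `ones m + 1` makes visitF compute exactly the Python recursion
def ones (m : List (List Int)) : Nat :=
  (m.map (fun r => r.countP (fun v => !(v == 0)))).sum

-- visit_islands_dfs: returns (matrix after its in-place mutation, area)
def visitF : Nat → List (List Int) → Int → Int → List (List Int) × Int
  | 0, m, _, _ => (m, 0)
  | f + 1, m, x, y =>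
    if x < 0 ∨ (m.length : Int) ≤ x ∨ y < 0 ∨ (m.headI.length : Int) ≤ y then (m, 0)
    else if cellGet m x y == 0 then (m, 0)
    else
      let m1 := cellSet m x y
      let r1 := visitF f m1 (x + 1) y
      let r2 := visitF f r1.1 (x - 1) y
      let r3 := visitF f r2.1 x (y + 1)
      let r4 := visitF f r3.1 x (y - 1)
      (r4.1, 1 + r1.2 + r2.2 + r3.2 + r4.2)

def max_island_area_dfs (matrix : List (List Int)) : Int :=
  let rows : Int := matrix.length
  let cols : Int := matrix.headI.length  -- len(matrix[0]); raises in Python on [], excluded by Pre_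
  let st :=
    (PySem.List.pyRange 0 rows 1).foldl (fun st i =>
      (PySem.List.pyRange 0 cols 1).foldl (fun st j =>
        if cellGet st.1 i j == 1 then
          let r := visitF (ones st.1 + 1) st.1 i j
          (r.1, max st.2 r.2)
        else st) st) (matrix, (0 : Int))
  st.2

-- ===== PORT B =====
-- the while loop over the explicit stack (head of the list = top of the Python stack), with the
-- precomputed bounds rows/cols and the two continue-style guards of Source B; the fuel counter realises
-- termination: each iteration pops once, and a land pop trades one nonzero cell for four pushes, so
-- 4 * ones m + stack.length drops by one per iteration and fuel 4 * ones m + stack.length is enough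
def fill (rows cols : Int) : Nat → List (List Int) → List (Int × Int) → Int → List (List Int) × Int
  | _, m, [], area => (m, area)
  | 0, m, _ :: _, area => (m, area)
  | f + 1, m, (x, y) :: rest, area =>
    if x < 0 ∨ rows ≤ x ∨ y < 0 ∨ cols ≤ y then fill rows cols f m rest area
    else if cellGet m x y == 0 then fill rows cols f m rest area
    else fill rows cols f (cellSet m x y)
           ((x + 1, y) :: (x - 1, y) :: (x, y + 1) :: (x, y - 1) :: rest) (area + 1)

-- the `for i, j in cells` loop, threading the mutated matrix and the running best
def scanB (rows cols : Int) : List (Int × Int) → List (List Int) → Int → Int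
  | [], _, best => best
  | (i, j) :: rest, m, best =>
    if cellGet m i j ≠ 1 then scanB rows cols rest m best
    else
      let r := fill rows cols (4 * ones m + 1) m [(i, j)] 0
      scanB rows cols rest r.1 (if r.2 > best then r.2 else best)

def max_island_area_dfs_alt (matrix : List (List Int)) : Int :=
  let rows : Int := matrix.length
  let cols : Int := matrix.headI.length  -- len(matrix[0]); raises in Python on [], excluded by Pre_
  let cells := (PySem.List.pyRange 0 rows 1).flatMap
    (fun i => (PySem.List.pyRange 0 cols 1).map (fun j => (i, j)))
  scanB rows cols cells matrix 0

-- ===== PRECONDITION & SPEC =====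
-- Pre_ excludes exactly the inputs where Python A raises IndexError: the empty matrix
-- (len(matrix[0])) and ragged matrices with some row shorter than row 0 (matrix[i][j] in the scan).
def Pre_max_island_area_dfs (matrix : List (List Int)) : Prop :=
  matrix ≠ [] ∧ ∀ row ∈ matrix, matrix.headI.length ≤ row.length
instance (matrix : List (List Int)) : Decidable (Pre_max_island_area_dfs matrix) := by
  unfold Pre_max_island_area_dfs; infer_instance

def pvWitness_max_island_area_dfs : List (List Int) := [[1, 0, 1], [1, 1, 0]]

def Spec_max_island_area_dfs (matrix : List (List Int)) (out : Int) : Prop := out = max_island_area_dfs_alt matrix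
instance (matrix : List (List Int)) (out : Int) : Decidable (Spec_max_island_area_dfs matrix out) := by unfold Spec_max_island_area_dfs; infer_instance

-- ===== CLAIM (what is proved, stated in full; the proofs are below) =====
def Claim_equal_max_island_area_dfs : Prop := ∀ (matrix : List (List Int)), Dom_max_island_area_dfs matrix → Pre_max_island_area_dfs matrix → Spec_max_island_area_dfs matrix (max_island_area_dfs matrix)

-- ===== LEMMAS AND PROOFS =====

-- cellSet preserves the shape of the matrix
theorem cellSet_length (m : List (List Int)) (x y : Int) :
    (cellSet m x y).length = m.length := by
  simp [cellSet]

theorem cellSet_headI_length (m : List (List Int)) (x y : Int) (hx0 : 0 ≤ x) :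
    (cellSet m x y).headI.length = m.headI.length := by
  have h1 : PySem.List.pyGetD m x [] = m.getD x.toNat [] := by
    rw [← Int.toNat_of_nonneg hx0, PySem.List.pyGetD_natCast]; simp [Int.toNat_of_nonneg hx0]
  unfold cellSet
  rw [h1]
  cases m with
  | nil => simp
  | cons r t =>
    cases hx : x.toNat with
    | zero => simp
    | succ n => simp

theorem visitF_shape : ∀ (f : Nat) (m : List (List Int)) (x y : Int),
    (visitF f m x y).1.length = m.length ∧ (visitF f m x y).1.headI.length = m.headI.length := by
  intro f
  induction f with
  | zero => intro m x y; simp [visitF]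
  | succ f ih =>
    intro m x y
    rw [visitF]
    split
    · simp
    · split
      · simp
      · rename_i h1 _
        push Not at h1
        simp only []
        have s1 := cellSet_length m x y
        have s2 := cellSet_headI_length m x y h1.1
        have e1 := ih (cellSet m x y) (x + 1) y
        have e2 := ih (visitF f (cellSet m x y) (x + 1) y).1 (x - 1) y
        have e3 := ih (visitF f (visitF f (cellSet m x y) (x + 1) y).1 (x - 1) y).1 x (y + 1)
        have e4 := ih (visitF f (visitF f (visitF f (cellSet m x y) (x + 1) y).1 (x - 1) y).1 x (y + 1)).1 x (y - 1)
        exact ⟨by omega, by omega⟩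

-- zeroing a land cell drops `ones` by exactly one
theorem ones_cellSet_succ (m : List (List Int)) (x y : Int) (hx0 : 0 ≤ x) (hy0 : 0 ≤ y)
    (hne : cellGet m x y ≠ 0) : ones (cellSet m x y) + 1 = ones m := by
  have h1 : PySem.List.pyGetD m x [] = m.getD x.toNat [] := by
    rw [← Int.toNat_of_nonneg hx0, PySem.List.pyGetD_natCast]; simp [Int.toNat_of_nonneg hx0]
  have h2 : PySem.List.pyGetD (m.getD x.toNat []) y 0 = (m.getD x.toNat []).getD y.toNat 0 := by
    rw [← Int.toNat_of_nonneg hy0, PySem.List.pyGetD_natCast]; simp [Int.toNat_of_nonneg hy0]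
  unfold cellGet at hne
  unfold cellSet
  rw [h1] at hne ⊢
  rw [h2] at hne
  have hxlt : x.toNat < m.length := by
    by_contra hge
    have hz : m.getD x.toNat ([] : List Int) = [] := List.getD_eq_default _ _ (by omega)
    rw [hz] at hne
    simp at hne
  have hylt : y.toNat < (m.getD x.toNat []).length := by
    by_contra hge
    rw [List.getD_eq_default _ _ (by omega)] at hne
    exact hne rfl
  have hcnt : ∀ (r : List Int), ∀ j : Nat, j < r.length → r.getD j 0 ≠ 0 →
      (r.set j 0).countP (fun v => !(v == 0)) + 1 = r.countP (fun v => !(v == 0)) := by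
    intro r
    induction r with
    | nil => intro j h; simp at h
    | cons a t ih =>
      intro j hj hne'
      cases j with
      | zero =>
        simp only [List.getD_cons_zero] at hne'
        simp [hne']
      | succ j =>
        simp only [List.getD_cons_succ] at hne'
        simp only [List.set_cons_succ, List.countP_cons]
        have := ih j (by simpa using hj) hne'
        omega
  have hrow : ∀ (m' : List (List Int)), ∀ i : Nat, i < m'.length → ∀ r' : List Int,
      ones (m'.set i r') + (m'.getD i []).countP (fun v => !(v == 0)) =
        ones m' + r'.countP (fun v => !(v == 0)) := by
    intro m'
    induction m' with
    | nil => intro i h; simp at h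
    | cons a t ih =>
      intro i hi r'
      cases i with
      | zero => simp [ones]; omega
      | succ i =>
        simp only [List.set_cons_succ, List.getD_cons_succ, ones, List.map_cons, List.sum_cons]
        have := ih i (by simpa using hi) r'
        simp only [ones] at this
        omega
  have hc := hcnt (m.getD x.toNat []) y.toNat hylt hne
  have hs := hrow m x.toNat hxlt ((m.getD x.toNat []).set y.toNat 0)
  omega

theorem fill_nil (rows cols : Int) (f : Nat) (m : List (List Int)) (area : Int) :
    fill rows cols f m [] area = (m, area) := by
  cases f <;> rfl

-- the fuel counter is irrelevant once it is at least 4 * ones m + stack.length (the loop's measure)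
theorem fill_fuel_irrel (rows cols : Int) : ∀ (f g : Nat) (m : List (List Int))
    (stack : List (Int × Int)) (area : Int),
    4 * ones m + stack.length ≤ f → 4 * ones m + stack.length ≤ g →
    fill rows cols f m stack area = fill rows cols g m stack area := by
  intro f
  induction f with
  | zero =>
    intro g m stack area hf _
    cases stack with
    | nil => rw [fill_nil, fill_nil]
    | cons p rest => simp at hf
  | succ f ih =>
    intro g m stack area hf hg
    cases stack with
    | nil => rw [fill_nil, fill_nil]
    | cons p rest =>
      obtain ⟨x, y⟩ := p
      cases g with
      | zero => simp at hg
      | succ g =>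
        rw [fill, fill]
        by_cases hb : x < 0 ∨ rows ≤ x ∨ y < 0 ∨ cols ≤ y
        · rw [if_pos hb, if_pos hb]
          apply ih <;> (simp only [List.length_cons] at hf hg ⊢; omega)
        · rw [if_neg hb, if_neg hb]
          by_cases hw : (cellGet m x y == 0) = true
          · rw [if_pos hw, if_pos hw]
            apply ih <;> (simp only [List.length_cons] at hf hg ⊢; omega)
          · rw [if_neg hw, if_neg hw]
            push Not at hb
            have h1 := ones_cellSet_succ m x y hb.1 hb.2.2.1 (by simpa using hw)
            apply ih <;> (simp only [List.length_cons] at hf hg ⊢; omega)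

theorem visitF_ones_le : ∀ (f : Nat) (m : List (List Int)) (x y : Int),
    ones (visitF f m x y).1 ≤ ones m := by
  intro f
  induction f with
  | zero => intro m x y; simp [visitF]
  | succ f ih =>
    intro m x y
    rw [visitF]
    split
    · simp
    · split
      · simp
      · rename_i h1 h2
        simp only []
        push Not at h1
        have hne : cellGet m x y ≠ 0 := by simpa using h2
        have h0 := ones_cellSet_succ m x y h1.1 h1.2.2.1 hne
        have a1 := ih (cellSet m x y) (x + 1) y
        have a2 := ih (visitF f (cellSet m x y) (x + 1) y).1 (x - 1) y
        have a3 := ih (visitF f (visitF f (cellSet m x y) (x + 1) y).1 (x - 1) y).1 x (y + 1)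
        have a4 := ih (visitF f (visitF f (visitF f (cellSet m x y) (x + 1) y).1 (x - 1) y).1 x (y + 1)).1 x (y - 1)
        omega

-- popping (x, y) with B's loop is A's recursive visit followed by the loop on the remaining stack
theorem fill_visitF (rows cols : Int) : ∀ (fv fl : Nat) (m : List (List Int)) (x y : Int)
    (rest : List (Int × Int)) (area : Int),
    rows = (m.length : Int) → cols = (m.headI.length : Int) →
    ones m < fv → 4 * ones m + ((x, y) :: rest).length ≤ fl →
    fill rows cols fl m ((x, y) :: rest) area =
      fill rows cols (4 * ones (visitF fv m x y).1 + rest.length) (visitF fv m x y).1 rest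
        (area + (visitF fv m x y).2) := by
  intro fv
  induction fv with
  | zero => intro fl m x y rest area _ _ h; omega
  | succ fv ih =>
    intro fl m x y rest area hr hc hfv hfl
    cases fl with
    | zero => simp at hfl
    | succ fl =>
    rw [fill, visitF]
    by_cases hg : x < 0 ∨ (m.length : Int) ≤ x ∨ y < 0 ∨ (m.headI.length : Int) ≤ y
    · -- out of bounds: both sides skip
      rw [if_pos (by rw [hr, hc]; exact hg), if_pos hg]
      have hrest : 4 * ones m + rest.length ≤ fl := by
        simp only [List.length_cons] at hfl; omega
      have := fill_fuel_irrel rows cols fl (4 * ones m + rest.length) m rest area hrest (le_refl _)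
      simpa using this
    · rw [if_neg (by rw [hr, hc]; exact hg), if_neg hg]
      by_cases hw : (cellGet m x y == 0) = true
      · -- water: both sides skip
        rw [if_pos hw, if_pos hw]
        have hrest : 4 * ones m + rest.length ≤ fl := by
          simp only [List.length_cons] at hfl; omega
        have := fill_fuel_irrel rows cols fl (4 * ones m + rest.length) m rest area hrest (le_refl _)
        simpa using this
      · rw [if_neg hw, if_neg hw]
        push Not at hg
        simp only []
        have hones := ones_cellSet_succ m x y hg.1 hg.2.2.1 (by simpa using hw)
        have sL := cellSet_length m x y
        have sH := cellSet_headI_length m x y hg.1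
        have v1 := visitF_shape fv (cellSet m x y) (x + 1) y
        have v2 := visitF_shape fv (visitF fv (cellSet m x y) (x + 1) y).1 (x - 1) y
        have v3 := visitF_shape fv (visitF fv (visitF fv (cellSet m x y) (x + 1) y).1 (x - 1) y).1 x (y + 1)
        have h1 : ones (cellSet m x y) < fv := by omega
        have e2 := visitF_ones_le fv (cellSet m x y) (x + 1) y
        have e3 := visitF_ones_le fv (visitF fv (cellSet m x y) (x + 1) y).1 (x - 1) y
        have e4 := visitF_ones_le fv (visitF fv (visitF fv (cellSet m x y) (x + 1) y).1 (x - 1) y).1 x (y + 1)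
        have h2 : ones (visitF fv (cellSet m x y) (x + 1) y).1 < fv := by omega
        have h3 : ones (visitF fv (visitF fv (cellSet m x y) (x + 1) y).1 (x - 1) y).1 < fv := by omega
        have h4 : ones (visitF fv (visitF fv (visitF fv (cellSet m x y) (x + 1) y).1 (x - 1) y).1 x (y + 1)).1 < fv := by omega
        rw [ih fl _ _ _ _ _ (by omega) (by omega) h1
              (by simp only [List.length_cons] at hfl ⊢; omega)]
        rw [ih _ _ _ _ _ _ (by omega) (by omega) h2 (by simp only [List.length_cons]; omega)]
        rw [ih _ _ _ _ _ _ (by omega) (by omega) h3 (by simp only [List.length_cons]; omega)]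
        rw [ih _ _ _ _ _ _ (by omega) (by omega) h4 (by simp only [List.length_cons]; omega)]
        congr 1
        ring

-- B's scan over any cell list computes exactly A's fold with A's recursive step
theorem scanB_eq_foldl : ∀ (cells : List (Int × Int)) (m : List (List Int)) (best : Int),
    scanB (m.length : Int) (m.headI.length : Int) cells m best =
      (cells.foldl (fun st (p : Int × Int) =>
        if cellGet st.1 p.1 p.2 == 1 then
          let r := visitF (ones st.1 + 1) st.1 p.1 p.2
          (r.1, max st.2 r.2)
        else st) (m, best)).2 := by
  intro cells
  induction cells with
  | nil => intro m best; rfl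
  | cons p rest ih =>
    intro m best
    obtain ⟨i, j⟩ := p
    rw [scanB, List.foldl_cons]
    by_cases hc : cellGet m i j = 1
    · rw [if_neg (not_not_intro hc)]
      simp only [hc, BEq.rfl, if_pos]
      have hfill := fill_visitF (m.length : Int) (m.headI.length : Int) (ones m + 1)
        (4 * ones m + 1) m i j [] 0 rfl rfl (Nat.lt_succ_self _) (by simp)
      rw [fill_nil] at hfill
      simp only [hfill]
      have sh := visitF_shape (ones m + 1) m i j
      have hmax : (if (0 : Int) + (visitF (ones m + 1) m i j).2 > best then
          (0 : Int) + (visitF (ones m + 1) m i j).2 else best) =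
          max best (visitF (ones m + 1) m i j).2 := by
        by_cases h : best < (visitF (ones m + 1) m i j).2
        · rw [if_pos (by omega), max_eq_right h.le]; omega
        · rw [if_neg (by omega), max_eq_left (by omega)]
      rw [hmax, ← sh.1, ← sh.2, ih]
    · rw [if_pos hc]
      rw [if_neg (by simpa using hc)]
      exact ih _ _

theorem foldl_flatMap_pairs {α β : Type} (is : List α) (g : α → List β)
    (f : (List (List Int) × Int) → (α × β) → (List (List Int) × Int))
    (init : List (List Int) × Int) :
    ((is.flatMap (fun i => (g i).map (fun j => (i, j)))).foldl f init) =
      is.foldl (fun st i => (g i).foldl (fun st j => f st (i, j)) st) init := by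
  induction is generalizing init with
  | nil => rfl
  | cons a t ih => simp [List.flatMap_cons, List.foldl_append, List.foldl_map, ih]

-- ===== VERDICT (by name: the statement is the Claim_ definition above) =====
theorem max_island_area_dfs_spec : Claim_equal_max_island_area_dfs := by
  intro matrix _ _
  unfold Spec_max_island_area_dfs max_island_area_dfs max_island_area_dfs_alt
  simp only []
  rw [scanB_eq_foldl, foldl_flatMap_pairs]
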